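-- pv_equiv track=rewrite | github.com/xcad2k/CodeWars-Python | challenges_5kyu/mixbonacci.py | mixbonacci
-- ===== SOURCE A (Python) =====
-- def mixbonacci(pattern, length):
--
--     if pattern == [] or length == 0:
--         return []
--
--     outputdict = {}
--     outputlist = []
--     counter = {}
--
--     for p in pattern:
--         if p == "fib":
--             fibList = [0, 1]
--             for i in range(length + len(pattern)):
--                 fibList.append(
--                     fibList[i] + fibList[i + 1]
--                 )
--             outputdict["fib"] = fibList
--             counter["fib"] = 0
--
--         if p == "pad":
--             padList = [1, 0, 0]
--             for i in range(length + len(pattern)):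
--                 padList.append(
--                     padList[i] + padList[i + 1]
--                 )
--             outputdict["pad"] = padList
--             counter["pad"] = 0
--
--         if p == "jac":
--             jacList = [0, 1]
--             for i in range(length + len(pattern)):
--                 jacList.append(
--                     (jacList[i] * 2) + jacList[i + 1]
--                 )
--             outputdict["jac"] = jacList
--             counter["jac"] = 0
--
--         if p == "pel":
--             pelList = [0, 1]
--             for i in range(length + len(pattern)):
--                 pelList.append(
--                     pelList[i] + (pelList[i + 1] * 2)
--                 )
--             outputdict["pel"] = pelList
--             counter["pel"] = 0
--
--         if p == "tri":
--             triList = [0, 0, 1]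
--             for i in range(length + len(pattern)):
--                 triList.append(
--                     triList[i] + triList[i + 1] + triList[i + 2]
--                 )
--             outputdict["tri"] = triList
--             counter["tri"] = 0
--
--         if p == "tet":
--             tetList = [0, 0, 0, 1]
--             for i in range(length + len(pattern)):
--                 tetList.append(
--                     tetList[i] + tetList[i + 1] + tetList[i + 2] + tetList[i + 3]
--                 )
--             outputdict["tet"] = tetList
--             counter["tet"] = 0
--
--     i = 0
--     while i < length:
--         for p in pattern:
--             outputlist.append(outputdict[p][counter[p]])
--             counter[p] += 1
--             i += 1
--
--     return outputlist[:length]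
-- ===== SOURCE B (Python) =====
-- _INIT = {
--     "fib": [0, 1],
--     "pad": [1, 0, 0],
--     "jac": [0, 1],
--     "pel": [0, 1],
--     "tri": [0, 0, 1],
--     "tet": [0, 0, 0, 1],
-- }
--
-- def _step(name, w):
--     if name == "fib":
--         a, b = w
--         return a, [b, a + b]
--     if name == "pad":
--         a, b, c = w
--         return a, [b, c, a + b]
--     if name == "jac":
--         a, b = w
--         return a, [b, 2 * a + b]
--     if name == "pel":
--         a, b = w
--         return a, [b, a + 2 * b]
--     if name == "tri":
--         a, b, c = w
--         return a, [b, c, a + b + c]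
--     a, b, c, d = w
--     return a, [b, c, d, a + b + c + d]
--
-- def mixbonacci(pattern, length):
--     if pattern == [] or length == 0:
--         return []
--     windows = {p: list(_INIT[p]) for p in dict.fromkeys(pattern) if p in _INIT}
--     out = []
--     for k in range(length):
--         p = pattern[k % len(pattern)]
--         v, windows[p] = _step(p, windows[p])
--         out.append(v)
--     return out
-- ===== Notes on version B (the rewrite author's own statement) =====
-- stated objective: alternative
-- what changed: A precomputes a full table of length+len(pattern) terms for every distinct sequence name plus a counter dict and emits whole rounds before truncating; B keeps only a constant-size sliding window per distinct name and steps it once per emitted item, emitting exactly length items by indexing the pattern cyclically.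
import Mathlib
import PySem

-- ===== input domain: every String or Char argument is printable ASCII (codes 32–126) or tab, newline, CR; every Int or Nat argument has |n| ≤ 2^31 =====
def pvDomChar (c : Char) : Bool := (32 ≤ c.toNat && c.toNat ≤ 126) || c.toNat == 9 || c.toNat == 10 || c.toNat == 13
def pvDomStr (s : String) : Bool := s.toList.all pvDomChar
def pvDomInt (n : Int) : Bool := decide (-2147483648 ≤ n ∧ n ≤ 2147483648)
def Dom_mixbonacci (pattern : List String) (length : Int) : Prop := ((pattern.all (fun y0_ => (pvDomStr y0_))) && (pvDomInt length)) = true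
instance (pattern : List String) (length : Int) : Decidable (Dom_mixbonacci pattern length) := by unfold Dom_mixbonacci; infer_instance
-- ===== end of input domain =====

-- B replaces A's precomputed per-sequence tables (of size length+len(pattern) each) by O(1)-state
-- sliding-window generators stepped once per emitted item (objective: alternative / leaner computation).

-- ===== PORT A =====
-- the six table-building loops of A (each: seed list, then append the recurrence length+len(pattern) times)
def buildFib (K : Int) : List Int :=
  (PySem.List.pyRange 0 K).foldl
    (fun l i => l ++ [PySem.List.pyGetD l i 0 + PySem.List.pyGetD l (i+1) 0]) [0, 1]

def buildPad (K : Int) : List Int :=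
  (PySem.List.pyRange 0 K).foldl
    (fun l i => l ++ [PySem.List.pyGetD l i 0 + PySem.List.pyGetD l (i+1) 0]) [1, 0, 0]

def buildJac (K : Int) : List Int :=
  (PySem.List.pyRange 0 K).foldl
    (fun l i => l ++ [PySem.List.pyGetD l i 0 * 2 + PySem.List.pyGetD l (i+1) 0]) [0, 1]

def buildPel (K : Int) : List Int :=
  (PySem.List.pyRange 0 K).foldl
    (fun l i => l ++ [PySem.List.pyGetD l i 0 + PySem.List.pyGetD l (i+1) 0 * 2]) [0, 1]

def buildTri (K : Int) : List Int :=
  (PySem.List.pyRange 0 K).foldl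
    (fun l i => l ++ [PySem.List.pyGetD l i 0 + PySem.List.pyGetD l (i+1) 0 + PySem.List.pyGetD l (i+2) 0]) [0, 0, 1]

def buildTet (K : Int) : List Int :=
  (PySem.List.pyRange 0 K).foldl
    (fun l i => l ++ [PySem.List.pyGetD l i 0 + PySem.List.pyGetD l (i+1) 0 + PySem.List.pyGetD l (i+2) 0 + PySem.List.pyGetD l (i+3) 0]) [0, 0, 0, 1]

-- one iteration of A's "for p in pattern" table-filling loop (the six ifs are mutually exclusive,
-- so the if-chain is exact)
def tableStep (K : Int) (s : PySem.Dict String (List Int) × PySem.Dict String Int) (p : String) :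
    PySem.Dict String (List Int) × PySem.Dict String Int :=
  if p == "fib" then (s.1.insert "fib" (buildFib K), s.2.insert "fib" 0)
  else if p == "pad" then (s.1.insert "pad" (buildPad K), s.2.insert "pad" 0)
  else if p == "jac" then (s.1.insert "jac" (buildJac K), s.2.insert "jac" 0)
  else if p == "pel" then (s.1.insert "pel" (buildPel K), s.2.insert "pel" 0)
  else if p == "tri" then (s.1.insert "tri" (buildTri K), s.2.insert "tri" 0)
  else if p == "tet" then (s.1.insert "tet" (buildTet K), s.2.insert "tet" 0)
  else s

-- one slot of A's inner "for p in pattern" emitting loop: append outputdict[p][counter[p]],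
-- counter[p] += 1, i += 1  (state = (outputlist, counter, i))
def roundStep (tables : PySem.Dict String (List Int)) (s : List Int × PySem.Dict String Int × Int)
    (p : String) : List Int × PySem.Dict String Int × Int :=
  (s.1 ++ [PySem.List.pyGetD ((tables.get? p).getD []) ((s.2.1.get? p).getD 0) 0],
   s.2.1.insert p ((s.2.1.get? p).getD 0 + 1),
   s.2.2 + 1)

-- the inner loop advances i by len(pattern) (needed for termination of the while loop)
theorem roundStep_len (tables : PySem.Dict String (List Int)) :
    ∀ (l : List String) (s : List Int × PySem.Dict String Int × Int),
      (List.foldl (roundStep tables) s l).2.2 = s.2.2 + l.length := by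
  intro l
  induction l with
  | nil => intro s; simp
  | cons p l ih =>
      intro s
      simp only [List.foldl_cons, ih, roundStep, List.length_cons]
      push_cast
      ring

-- A's "while i < length" loop
def whileA (pattern : List String) (length : Int) (tables : PySem.Dict String (List Int))
    (c : PySem.Dict String Int) (out : List Int) (i : Int) : List Int :=
  if h : pattern ≠ [] ∧ i < length then
    whileA pattern length tables
      (pattern.foldl (roundStep tables) (out, c, i)).2.1
      (pattern.foldl (roundStep tables) (out, c, i)).1
      (pattern.foldl (roundStep tables) (out, c, i)).2.2
  else out
termination_by (length - i).toNat
decreasing_by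
  have hs := roundStep_len tables pattern (out, c, i)
  have hm : pattern.length ≠ 0 := fun hlen => h.1 (List.length_eq_zero_iff.mp hlen)
  simp only [List.foldl_attach]
  rw [hs]
  show ((length : Int) - (i + (pattern.length : Int))).toNat < (length - i).toNat
  have h2 := h.2
  omega

def mixbonacci (pattern : List String) (length : Int) : List Int :=
  if pattern = [] ∨ length = 0 then []
  else
    let tc := pattern.foldl (tableStep (length + pattern.length)) (∅, ∅)
    PySem.List.slice (whileA pattern length tc.1 tc.2 [] 0) none (some length)

-- ===== PORT B =====
-- the _INIT dict of Source B
def pvInit : PySem.Dict String (List Int) :=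
  PySem.Dict.ofList
    [("fib", [0, 1]), ("pad", [1, 0, 0]), ("jac", [0, 1]),
     ("pel", [0, 1]), ("tri", [0, 0, 1]), ("tet", [0, 0, 0, 1])]

-- _step of Source B: yield the head of the window, slide the window by the recurrence
def stepW (p : String) (w : List Int) : Int × List Int :=
  if p == "fib" then match w with | [a, b] => (a, [b, a + b]) | _ => (0, [])
  else if p == "pad" then match w with | [a, b, c] => (a, [b, c, a + b]) | _ => (0, [])
  else if p == "jac" then match w with | [a, b] => (a, [b, 2 * a + b]) | _ => (0, [])
  else if p == "pel" then match w with | [a, b] => (a, [b, a + 2 * b]) | _ => (0, [])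
  else if p == "tri" then match w with | [a, b, c] => (a, [b, c, a + b + c]) | _ => (0, [])
  else match w with | [a, b, c, d] => (a, [b, c, d, a + b + c + d]) | _ => (0, [])

-- Source B's "for k in range(length)" loop: n items still to emit, k the running position
def goB (pattern : List String) : Nat → Nat → PySem.Dict String (List Int) → List Int
  | 0, _, _ => []
  | n + 1, k, st =>
      let p := PySem.List.pyGetD pattern (PySem.Int.mod (k : Int) (pattern.length : Int)) ""
      let vw := stepW p ((st.get? p).getD [])
      vw.1 :: goB pattern n (k + 1) (st.insert p vw.2)

def mixbonacci_alt (pattern : List String) (length : Int) : List Int :=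
  if pattern = [] ∨ length = 0 then []
  else
    let windows := (PySem.List.dedup pattern).foldl
      (fun d p => match pvInit.get? p with | some w => d.insert p w | none => d)
      (∅ : PySem.Dict String (List Int))
    goB pattern length.toNat 0 windows

-- ===== PRECONDITION & SPEC =====
-- Pre_ excludes exactly the inputs where A raises KeyError: a positive length together with a
-- pattern containing a name other than the six known sequences.
def Pre_mixbonacci (pattern : List String) (length : Int) : Prop :=
  pattern = [] ∨ length ≤ 0 ∨
    ∀ p ∈ pattern, p ∈ (["fib", "pad", "jac", "pel", "tri", "tet"] : List String)
instance (pattern : List String) (length : Int) : Decidable (Pre_mixbonacci pattern length) := by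
  unfold Pre_mixbonacci; infer_instance

def pvWitness_mixbonacci : List String × Int := (["fib", "pel", "tri"], 7)

def Spec_mixbonacci (pattern : List String) (length : Int) (out : List Int) : Prop := out = mixbonacci_alt pattern length
instance (pattern : List String) (length : Int) (out : List Int) : Decidable (Spec_mixbonacci pattern length out) := by unfold Spec_mixbonacci; infer_instance

-- ===== CLAIM (what is proved, stated in full; the proofs are below) =====
def Claim_equal_mixbonacci : Prop := ∀ (pattern : List String) (length : Int), Dom_mixbonacci pattern length → Pre_mixbonacci pattern length → Spec_mixbonacci pattern length (mixbonacci pattern length)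

-- ===== LEMMAS AND PROOFS =====

-- B's window after j steps of the sequence named p, and the j-th value of that sequence
def winAt (p : String) (j : Nat) : List Int := (fun w => (stepW p w).2)^[j] ((pvInit.get? p).getD [])
def valS (p : String) (j : Nat) : Int := (stepW p (winAt p j)).1

def pvNames : List String := ["fib", "pad", "jac", "pel", "tri", "tet"]

-- table of sequence p as A builds it, stated through valS
def baseN (p : String) : Nat := ((pvInit.get? p).getD []).length

theorem winAt_succ (p : String) (j : Nat) : winAt p (j + 1) = (stepW p (winAt p j)).2 := by
  simp [winAt, Function.iterate_succ_apply']

-- shapes of the windows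
theorem win_fib (j : Nat) : ∃ a b, winAt "fib" j = [a, b] := by
  induction j with
  | zero => exact ⟨0, 1, rfl⟩
  | succ j ih => obtain ⟨a, b, h⟩ := ih; exact ⟨b, a + b, by rw [winAt_succ, h]; rfl⟩

theorem win_pad (j : Nat) : ∃ a b c, winAt "pad" j = [a, b, c] := by
  induction j with
  | zero => exact ⟨1, 0, 0, rfl⟩
  | succ j ih => obtain ⟨a, b, c, h⟩ := ih; exact ⟨b, c, a + b, by rw [winAt_succ, h]; rfl⟩

theorem win_jac (j : Nat) : ∃ a b, winAt "jac" j = [a, b] := by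
  induction j with
  | zero => exact ⟨0, 1, rfl⟩
  | succ j ih => obtain ⟨a, b, h⟩ := ih; exact ⟨b, 2 * a + b, by rw [winAt_succ, h]; rfl⟩

theorem win_pel (j : Nat) : ∃ a b, winAt "pel" j = [a, b] := by
  induction j with
  | zero => exact ⟨0, 1, rfl⟩
  | succ j ih => obtain ⟨a, b, h⟩ := ih; exact ⟨b, a + 2 * b, by rw [winAt_succ, h]; rfl⟩

theorem win_tri (j : Nat) : ∃ a b c, winAt "tri" j = [a, b, c] := by
  induction j with
  | zero => exact ⟨0, 0, 1, rfl⟩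
  | succ j ih => obtain ⟨a, b, c, h⟩ := ih; exact ⟨b, c, a + b + c, by rw [winAt_succ, h]; rfl⟩

theorem win_tet (j : Nat) : ∃ a b c d, winAt "tet" j = [a, b, c, d] := by
  induction j with
  | zero => exact ⟨0, 0, 0, 1, rfl⟩
  | succ j ih => obtain ⟨a, b, c, d, h⟩ := ih; exact ⟨b, c, d, a + b + c + d, by rw [winAt_succ, h]; rfl⟩

-- recurrences of valS
theorem rec_fib (n : Nat) : valS "fib" (n + 2) = valS "fib" n + valS "fib" (n + 1) := by
  obtain ⟨a, b, h⟩ := win_fib n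
  have h1 : winAt "fib" (n + 1) = [b, a + b] := by rw [winAt_succ, h]; rfl
  have h2 : winAt "fib" (n + 2) = [a + b, b + (a + b)] := by rw [winAt_succ, h1]; rfl
  simp [valS, h, h1, h2, stepW]

theorem rec_pad (n : Nat) : valS "pad" (n + 3) = valS "pad" n + valS "pad" (n + 1) := by
  obtain ⟨a, b, c, h⟩ := win_pad n
  have h1 : winAt "pad" (n + 1) = [b, c, a + b] := by rw [winAt_succ, h]; rfl
  have h2 : winAt "pad" (n + 2) = [c, a + b, b + c] := by rw [winAt_succ, h1]; rfl
  have h3 : winAt "pad" (n + 3) = [a + b, b + c, c + (a + b)] := by rw [winAt_succ, h2]; rfl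
  simp [valS, h, h1, h3, stepW]

theorem rec_jac (n : Nat) : valS "jac" (n + 2) = 2 * valS "jac" n + valS "jac" (n + 1) := by
  obtain ⟨a, b, h⟩ := win_jac n
  have h1 : winAt "jac" (n + 1) = [b, 2 * a + b] := by rw [winAt_succ, h]; rfl
  have h2 : winAt "jac" (n + 2) = [2 * a + b, 2 * b + (2 * a + b)] := by rw [winAt_succ, h1]; rfl
  simp [valS, h, h1, h2, stepW]

theorem rec_pel (n : Nat) : valS "pel" (n + 2) = valS "pel" n + 2 * valS "pel" (n + 1) := by
  obtain ⟨a, b, h⟩ := win_pel n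
  have h1 : winAt "pel" (n + 1) = [b, a + 2 * b] := by rw [winAt_succ, h]; rfl
  have h2 : winAt "pel" (n + 2) = [a + 2 * b, b + 2 * (a + 2 * b)] := by rw [winAt_succ, h1]; rfl
  simp [valS, h, h1, h2, stepW]

theorem rec_tri (n : Nat) :
    valS "tri" (n + 3) = valS "tri" n + valS "tri" (n + 1) + valS "tri" (n + 2) := by
  obtain ⟨a, b, c, h⟩ := win_tri n
  have h1 : winAt "tri" (n + 1) = [b, c, a + b + c] := by rw [winAt_succ, h]; rfl
  have h2 : winAt "tri" (n + 2) = [c, a + b + c, b + c + (a + b + c)] := by rw [winAt_succ, h1]; rfl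
  have h3 : winAt "tri" (n + 3) = [a + b + c, b + c + (a + b + c), c + (a + b + c) + (b + c + (a + b + c))] := by
    rw [winAt_succ, h2]; rfl
  simp [valS, h, h1, h2, h3, stepW]

theorem rec_tet (n : Nat) :
    valS "tet" (n + 4) = valS "tet" n + valS "tet" (n + 1) + valS "tet" (n + 2) + valS "tet" (n + 3) := by
  obtain ⟨a, b, c, d, h⟩ := win_tet n
  have h1 : winAt "tet" (n + 1) = [b, c, d, a + b + c + d] := by rw [winAt_succ, h]; rfl
  have h2 : winAt "tet" (n + 2) = [c, d, a + b + c + d, b + c + d + (a + b + c + d)] := by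
    rw [winAt_succ, h1]; rfl
  have h3 : winAt "tet" (n + 3) = [d, a + b + c + d, b + c + d + (a + b + c + d),
      c + d + (a + b + c + d) + (b + c + d + (a + b + c + d))] := by rw [winAt_succ, h2]; rfl
  have h4 : winAt "tet" (n + 4) = (stepW "tet" (winAt "tet" (n + 3))).2 := winAt_succ _ _
  rw [h3] at h4
  simp [valS, h, h1, h2, h3, h4, stepW]

-- generic characterisation of A's table-building folds
theorem foldl_build (f : List Int → Int → Int) (v : Nat → Int) (b : Nat) (w0 : List Int)
    (h0 : w0 = (List.range b).map v)
    (hf : ∀ n : Nat, f ((List.range (b + n)).map v) (n : Int) = v (b + n)) (K : Nat) :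
    (PySem.List.pyRange 0 (K : Int)).foldl (fun l i => l ++ [f l i]) w0 =
      (List.range (b + K)).map v := by
  rw [PySem.List.pyRange_zero_natCast]
  induction K with
  | zero => simpa using h0
  | succ K ih =>
      rw [List.range_succ, List.map_append, List.foldl_append, ih]
      simp only [List.map_cons, List.map_nil, List.foldl_cons, List.foldl_nil, hf K]
      rw [show b + (K + 1) = (b + K) + 1 by omega, List.range_succ, List.map_append]
      simp

theorem buildFib_eq (K : Nat) : buildFib (K : Int) = (List.range (2 + K)).map (valS "fib") := by
  refine foldl_build _ (valS "fib") 2 _ (by decide) (fun n => ?_) K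
  rw [show ((n : Int) + 1) = ((n + 1 : Nat) : Int) by push_cast; ring]
  rw [PySem.List.pyGetD_natCast, PySem.List.pyGetD_natCast,
    PySem.List.getD_map_range _ _ _ _ (by omega), PySem.List.getD_map_range _ _ _ _ (by omega)]
  rw [show 2 + n = n + 2 by omega, rec_fib]

theorem buildPad_eq (K : Nat) : buildPad (K : Int) = (List.range (3 + K)).map (valS "pad") := by
  refine foldl_build _ (valS "pad") 3 _ (by decide) (fun n => ?_) K
  rw [show ((n : Int) + 1) = ((n + 1 : Nat) : Int) by push_cast; ring]
  rw [PySem.List.pyGetD_natCast, PySem.List.pyGetD_natCast,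
    PySem.List.getD_map_range _ _ _ _ (by omega), PySem.List.getD_map_range _ _ _ _ (by omega)]
  rw [show 3 + n = n + 3 by omega, rec_pad]

theorem buildJac_eq (K : Nat) : buildJac (K : Int) = (List.range (2 + K)).map (valS "jac") := by
  refine foldl_build _ (valS "jac") 2 _ (by decide) (fun n => ?_) K
  rw [show ((n : Int) + 1) = ((n + 1 : Nat) : Int) by push_cast; ring]
  rw [PySem.List.pyGetD_natCast, PySem.List.pyGetD_natCast,
    PySem.List.getD_map_range _ _ _ _ (by omega), PySem.List.getD_map_range _ _ _ _ (by omega)]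
  rw [show 2 + n = n + 2 by omega, rec_jac]
  ring

theorem buildPel_eq (K : Nat) : buildPel (K : Int) = (List.range (2 + K)).map (valS "pel") := by
  refine foldl_build _ (valS "pel") 2 _ (by decide) (fun n => ?_) K
  rw [show ((n : Int) + 1) = ((n + 1 : Nat) : Int) by push_cast; ring]
  rw [PySem.List.pyGetD_natCast, PySem.List.pyGetD_natCast,
    PySem.List.getD_map_range _ _ _ _ (by omega), PySem.List.getD_map_range _ _ _ _ (by omega)]
  rw [show 2 + n = n + 2 by omega, rec_pel]
  ring

theorem buildTri_eq (K : Nat) : buildTri (K : Int) = (List.range (3 + K)).map (valS "tri") := by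
  refine foldl_build _ (valS "tri") 3 _ (by decide) (fun n => ?_) K
  rw [show ((n : Int) + 1) = ((n + 1 : Nat) : Int) by push_cast; ring,
    show ((n : Int) + 2) = ((n + 2 : Nat) : Int) by push_cast; ring]
  rw [PySem.List.pyGetD_natCast, PySem.List.pyGetD_natCast, PySem.List.pyGetD_natCast,
    PySem.List.getD_map_range _ _ _ _ (by omega), PySem.List.getD_map_range _ _ _ _ (by omega),
    PySem.List.getD_map_range _ _ _ _ (by omega)]
  rw [show 3 + n = n + 3 by omega, rec_tri]

theorem buildTet_eq (K : Nat) : buildTet (K : Int) = (List.range (4 + K)).map (valS "tet") := by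
  refine foldl_build _ (valS "tet") 4 _ (by decide) (fun n => ?_) K
  rw [show ((n : Int) + 1) = ((n + 1 : Nat) : Int) by push_cast; ring,
    show ((n : Int) + 2) = ((n + 2 : Nat) : Int) by push_cast; ring,
    show ((n : Int) + 3) = ((n + 3 : Nat) : Int) by push_cast; ring]
  rw [PySem.List.pyGetD_natCast, PySem.List.pyGetD_natCast, PySem.List.pyGetD_natCast,
    PySem.List.pyGetD_natCast, PySem.List.getD_map_range _ _ _ _ (by omega),
    PySem.List.getD_map_range _ _ _ _ (by omega), PySem.List.getD_map_range _ _ _ _ (by omega),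
    PySem.List.getD_map_range _ _ _ _ (by omega)]
  rw [show 4 + n = n + 4 by omega, rec_tet]

-- the table A stores for name p, through valS
def tblOf (p : String) (K : Int) : List Int :=
  if p = "fib" then buildFib K else if p = "pad" then buildPad K else if p = "jac" then buildJac K
  else if p = "pel" then buildPel K else if p = "tri" then buildTri K else buildTet K

theorem tblOf_eq (p : String) (hp : p ∈ pvNames) (K : Nat) :
    tblOf p (K : Int) = (List.range (baseN p + K)).map (valS p) := by
  simp only [pvNames, List.mem_cons, List.not_mem_nil, or_false] at hp
  rcases hp with rfl | rfl | rfl | rfl | rfl | rfl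
  · exact buildFib_eq K
  · exact buildPad_eq K
  · exact buildJac_eq K
  · exact buildPel_eq K
  · exact buildTri_eq K
  · exact buildTet_eq K

theorem tableStep_preserve (K : Int) (s : PySem.Dict String (List Int) × PySem.Dict String Int)
    (q p : String) (hne : p ≠ q) :
    (tableStep K s q).1.get? p = s.1.get? p ∧ (tableStep K s q).2.get? p = s.2.get? p := by
  unfold tableStep
  split_ifs with h1 h2 h3 h4 h5 h6 <;>
    simp only [beq_iff_eq] at h1 <;>
    try simp only [beq_iff_eq] at h2 h3 h4 h5 h6
  all_goals
    first
      | exact ⟨rfl, rfl⟩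
      | exact ⟨PySem.Dict.get?_insert_of_ne _ _ (by simp_all),
               PySem.Dict.get?_insert_of_ne _ _ (by simp_all)⟩

theorem tableStep_self (K : Int) (s : PySem.Dict String (List Int) × PySem.Dict String Int)
    (q : String) (hq : q ∈ pvNames) :
    (tableStep K s q).1.get? q = some (tblOf q K) ∧ (tableStep K s q).2.get? q = some 0 := by
  simp only [pvNames, List.mem_cons, List.not_mem_nil, or_false] at hq
  rcases hq with rfl | rfl | rfl | rfl | rfl | rfl <;>
    simp [tableStep, tblOf, PySem.Dict.get?_insert_self]

theorem tables_fold_preserve (K : Int) (l : List String) (p : String) (hpl : p ∉ l) :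
    ∀ (acc : PySem.Dict String (List Int) × PySem.Dict String Int),
      (l.foldl (tableStep K) acc).1.get? p = acc.1.get? p ∧
      (l.foldl (tableStep K) acc).2.get? p = acc.2.get? p := by
  induction l with
  | nil => intro acc; exact ⟨rfl, rfl⟩
  | cons q l ih =>
      intro acc
      have hne : p ≠ q := fun h => hpl (h ▸ List.mem_cons_self)
      have hnl : p ∉ l := fun h => hpl (List.mem_cons_of_mem _ h)
      rw [List.foldl_cons]
      exact ⟨(ih hnl _).1.trans (tableStep_preserve K acc q p hne).1,
             (ih hnl _).2.trans (tableStep_preserve K acc q p hne).2⟩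

-- after A's table-filling loop, every name of the pattern has its table and counter 0
theorem tables_fold (K : Int) (l : List String) (p : String) (hpl : p ∈ l) (hp : p ∈ pvNames) :
    ∀ (acc : PySem.Dict String (List Int) × PySem.Dict String Int),
      (l.foldl (tableStep K) acc).1.get? p = some (tblOf p K) ∧
      (l.foldl (tableStep K) acc).2.get? p = some 0 := by
  induction l with
  | nil => cases hpl
  | cons q l ih =>
      intro acc
      rw [List.foldl_cons]
      by_cases hmem : p ∈ l
      · exact ih hmem _
      · have : p = q := by rcases List.mem_cons.mp hpl with h | h; exact h; exact absurd h hmem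
        subst this
        exact ⟨(tables_fold_preserve K l p hmem _).1.trans (tableStep_self K acc p hp).1,
               (tables_fold_preserve K l p hmem _).2.trans (tableStep_self K acc p hp).2⟩

theorem windows_fold_preserve (l : List String) (p : String) (hpl : p ∉ l) :
    ∀ (acc : PySem.Dict String (List Int)),
      (l.foldl (fun d q => match pvInit.get? q with | some w => d.insert q w | none => d) acc).get? p
        = acc.get? p := by
  induction l with
  | nil => intro acc; rfl
  | cons q l ih =>
      intro acc
      have hne : p ≠ q := fun h => hpl (h ▸ List.mem_cons_self)
      rw [List.foldl_cons, ih (fun h => hpl (List.mem_cons_of_mem _ h))]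
      cases hq : pvInit.get? q with
      | none => simp
      | some w => simp [PySem.Dict.get?_insert_of_ne _ _ hne]

-- after B's window-building fold, every known name of the pattern has its initial window
theorem windows_fold (l : List String) (p : String) (hpl : p ∈ l) (hp : p ∈ pvNames) :
    ∀ (acc : PySem.Dict String (List Int)),
      (l.foldl (fun d q => match pvInit.get? q with | some w => d.insert q w | none => d) acc).get? p
        = some (winAt p 0) := by
  induction l with
  | nil => cases hpl
  | cons q l ih =>
      intro acc
      rw [List.foldl_cons]
      by_cases hmem : p ∈ l
      · exact ih hmem _
      · have hpq : p = q := by rcases List.mem_cons.mp hpl with h | h; exact h; exact absurd h hmem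
        subst hpq
        rw [windows_fold_preserve l p hmem _]
        have hw : pvInit.get? p = some (winAt p 0) := by
          simp only [pvNames, List.mem_cons, List.not_mem_nil, or_false] at hp
          rcases hp with rfl | rfl | rfl | rfl | rfl | rfl <;> decide
        rw [hw]
        exact PySem.Dict.get?_insert_self _ _ _

theorem goB_take (pattern : List String) :
    ∀ (n n' : Nat) (k : Nat) (st : PySem.Dict String (List Int)), n ≤ n' →
      (goB pattern n' k st).take n = goB pattern n k st := by
  intro n
  induction n with
  | zero => intro n' k st _; simp [goB]
  | succ n ih =>
      intro n' k st h
      obtain ⟨n'', rfl⟩ : ∃ m, n' = m + 1 := ⟨n' - 1, by omega⟩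
      simp only [goB, List.take_succ_cons]
      rw [ih n'' (k + 1) _ (by omega)]

-- the loop invariant: every name of the pattern has an Int counter j with B's window at j
def InvM (pattern : List String) (c : PySem.Dict String Int)
    (st : PySem.Dict String (List Int)) (k : Nat) : Prop :=
  ∀ p ∈ pattern, ∃ j : Nat, c.get? p = some (j : Int) ∧ st.get? p = some (winAt p j) ∧ j ≤ k

-- one round of A's while-loop body emits the same values as len(pattern) steps of B
theorem roundA (pattern : List String) (KN : Nat)
    (tables : PySem.Dict String (List Int))
    (Htbl : ∀ p ∈ pattern, tables.get? p = some ((List.range (baseN p + KN)).map (valS p))) :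
    ∀ (suf pre : List String), pattern = pre ++ suf →
    ∀ (k : Nat) (c : PySem.Dict String Int) (st : PySem.Dict String (List Int))
      (out : List Int) (i : Int),
      k % pattern.length = pre.length % pattern.length →
      k + suf.length ≤ KN →
      InvM pattern c st k →
      ∃ (ys : List Int) (c' : PySem.Dict String Int) (st' : PySem.Dict String (List Int)),
        List.foldl (roundStep tables) (out, c, i) suf = (out ++ ys, c', i + suf.length) ∧
        (∀ n : Nat, goB pattern (suf.length + n) k st = ys ++ goB pattern n (k + suf.length) st') ∧
        InvM pattern c' st' (k + suf.length) := by
  intro suf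
  induction suf with
  | nil =>
      intro pre _ k c st out i _ _ hInv
      exact ⟨[], c, st, by simp, by intro n; simp, by simpa using hInv⟩
  | cons p suf' ih =>
      intro pre hsplit k c st out i hk hcap hInv
      have hpmem : p ∈ pattern := hsplit ▸ List.mem_append.mpr (Or.inr List.mem_cons_self)
      obtain ⟨j, hc, hst, hjk⟩ := hInv p hpmem
      have hm : 0 < pattern.length := by
        rw [hsplit]; simp
      have hprelt : pre.length < pattern.length := by
        rw [hsplit]; simp
      have hj : j < baseN p + KN := by
        simp only [List.length_cons] at hcap; omega
      -- the value A reads from the table is valS p j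
      have hstep : roundStep tables (out, c, i) p =
          (out ++ [valS p j], c.insert p ((j : Int) + 1), i + 1) := by
        simp only [roundStep, Htbl p hpmem, hc, Option.getD_some,
          PySem.List.pyGetD_natCast, PySem.List.getD_map_range _ _ _ _ hj]
      -- the new dictionaries after this slot
      have hInv1 : InvM pattern (c.insert p ((j : Int) + 1)) (st.insert p (winAt p (j + 1))) (k + 1) := by
        intro q hq
        by_cases hqp : q = p
        · subst hqp
          exact ⟨j + 1, by rw [PySem.Dict.get?_insert_self]; push_cast; ring_nf,
            by rw [PySem.Dict.get?_insert_self], by omega⟩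
        · obtain ⟨jq, hcq, hstq, hjq⟩ := hInv q hq
          exact ⟨jq, by rw [PySem.Dict.get?_insert_of_ne _ _ hqp]; exact hcq,
            by rw [PySem.Dict.get?_insert_of_ne _ _ hqp]; exact hstq, by omega⟩
      obtain ⟨ys', c', st', hfold, hgo, hInv'⟩ :=
        ih (pre ++ [p]) (by rw [hsplit]; simp) (k + 1) (c.insert p ((j : Int) + 1))
          (st.insert p (winAt p (j + 1))) (out ++ [valS p j]) (i + 1)
          (by simpa using Nat.ModEq.add_right 1 hk)
          (by simp only [List.length_cons] at hcap; omega) hInv1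
      refine ⟨valS p j :: ys', c', st', ?_, fun n => ?_, ?_⟩
      · rw [List.foldl_cons, hstep, hfold]
        refine Prod.ext ?_ (Prod.ext rfl ?_) <;> simp <;> push_cast <;> ring
      · -- one step of goB emits valS p j
        have hlen : (p :: suf').length + n = (suf'.length + n) + 1 := by simp; omega
        rw [hlen]
        have hidx : PySem.List.pyGetD pattern (PySem.Int.mod ((k : Nat) : Int) ((pattern.length : Nat) : Int)) "" = p := by
          rw [PySem.Int.mod_natCast, PySem.List.pyGetD_natCast, hk,
            Nat.mod_eq_of_lt hprelt]
          rw [hsplit]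
          simp [List.getD]
        simp only [goB, hidx, hst, Option.getD_some]
        have hy : (stepW p (winAt p j)).1 = valS p j := rfl
        have hw : (stepW p (winAt p j)).2 = winAt p (j + 1) := (winAt_succ p j).symm
        rw [hy, hw, hgo n, show k + (p :: suf').length = k + 1 + suf'.length from by
          simp only [List.length_cons]; omega]
        simp
      · simpa [Nat.add_assoc, Nat.add_comm 1 suf'.length] using hInv'

-- A's whole while-loop produces a prefix-extension of B's stream
theorem whileA_eq (pattern : List String) (length : Int) (hne : pattern ≠ []) (hpos : 0 < length)
    (tables : PySem.Dict String (List Int))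
    (Htbl : ∀ p ∈ pattern,
      tables.get? p = some ((List.range (baseN p + (length.toNat + pattern.length))).map (valS p))) :
    ∀ (k : Nat) (c : PySem.Dict String Int) (st : PySem.Dict String (List Int)) (out : List Int),
      k % pattern.length = 0 →
      InvM pattern c st k →
      ∃ R : Nat, length.toNat ≤ k + R ∧
        whileA pattern length tables c out (k : Int) = out ++ goB pattern R k st := by
  have hm : 0 < pattern.length := List.length_pos_iff.mpr hne
  suffices H : ∀ N : Nat, ∀ (k : Nat) (c : PySem.Dict String Int)
      (st : PySem.Dict String (List Int)) (out : List Int),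
      (length - (k : Int)).toNat ≤ N →
      k % pattern.length = 0 →
      InvM pattern c st k →
      ∃ R : Nat, length.toNat ≤ k + R ∧
        whileA pattern length tables c out (k : Int) = out ++ goB pattern R k st by
    exact fun k c st out h1 h2 => H _ k c st out le_rfl h1 h2
  intro N
  induction N with
  | zero =>
      intro k c st out hN _ _
      have hge : ¬ ((k : Int) < length) := by omega
      rw [whileA, dif_neg (fun hcon => hge hcon.2)]
      exact ⟨0, by omega, by simp [goB]⟩
  | succ N ihN =>
      intro k c st out hN hk0 hInv
      by_cases hlt : (k : Int) < length
      · obtain ⟨ys, c', st', hfold, hgo, hInv'⟩ :=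
          roundA pattern (length.toNat + pattern.length) tables Htbl pattern [] (by simp)
            k c st out (k : Int) (by simpa using hk0) (by omega) hInv
        obtain ⟨R', hR', heq⟩ := ihN (k + pattern.length) c' st' (out ++ ys)
          (by omega) (by simp [Nat.add_mod_right, hk0]) hInv'
        refine ⟨pattern.length + R', by omega, ?_⟩
        rw [whileA, dif_pos ⟨hne, hlt⟩, hfold]
        rw [show ((k : Int) + (pattern.length : Nat)) = ((k + pattern.length : Nat) : Int) from by
          push_cast; ring]
        rw [heq, hgo R', List.append_assoc]
      · rw [whileA, dif_neg (fun hcon => hlt hcon.2)]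
        exact ⟨0, by omega, by simp [goB]⟩

-- ===== VERDICT (by name: the statement is the Claim_ definition above) =====
theorem mixbonacci_spec : Claim_equal_mixbonacci := by
  unfold Claim_equal_mixbonacci
  intro pattern length _ hpre
  unfold Spec_mixbonacci mixbonacci mixbonacci_alt
  by_cases hbase : pattern = [] ∨ length = 0
  · rw [if_pos hbase, if_pos hbase]
  · rw [if_neg hbase, if_neg hbase]
    push Not at hbase
    obtain ⟨hne, hlen0⟩ := hbase
    dsimp only
    by_cases hneg : length < 0
    · -- negative length: A's while loop never runs, B's range is empty
      rw [whileA, dif_neg (fun hcon => by omega : ¬ (pattern ≠ [] ∧ (0 : Int) < length))]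
      rw [show length.toNat = 0 from by omega]
      simp [goB, PySem.List.slice]
    · have hpos : 0 < length := by omega
      have Hv : ∀ p ∈ pattern, p ∈ pvNames := by
        rcases hpre with h | h | h
        · exact absurd h hne
        · omega
        · exact h
      have hKcast : length + (pattern.length : Int) = ((length.toNat + pattern.length : Nat) : Int) := by
        omega
      have Htbl : ∀ p ∈ pattern,
          (pattern.foldl (tableStep (length + pattern.length)) (∅, ∅)).1.get? p =
            some ((List.range (baseN p + (length.toNat + pattern.length))).map (valS p)) := by
        intro p hp
        rw [(tables_fold _ pattern p hp (Hv p hp) _).1, hKcast,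
          tblOf_eq p (Hv p hp) (length.toNat + pattern.length)]
      have hInv0 : InvM pattern
          (pattern.foldl (tableStep (length + pattern.length)) (∅, ∅)).2
          ((PySem.List.dedup pattern).foldl
            (fun d q => match pvInit.get? q with | some w => d.insert q w | none => d) ∅) 0 := by
        intro p hp
        refine ⟨0, ?_, ?_, le_rfl⟩
        · exact (tables_fold _ pattern p hp (Hv p hp) _).2
        · exact windows_fold (PySem.List.dedup pattern) p
            ((PySem.List.mem_dedup pattern p).mpr hp) (Hv p hp) _
      obtain ⟨R, hR, heq⟩ := whileA_eq pattern length hne hpos _ Htbl 0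
        (pattern.foldl (tableStep (length + pattern.length)) (∅, ∅)).2
        ((PySem.List.dedup pattern).foldl
          (fun d q => match pvInit.get? q with | some w => d.insert q w | none => d) ∅)
        [] (Nat.zero_mod _) hInv0
      rw [show ((0 : Nat) : Int) = (0 : Int) from rfl] at heq
      rw [heq, List.nil_append, PySem.List.slice_to _ (le_of_lt hpos),
        goB_take pattern length.toNat R 0 _ (by omega)]
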